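-- pv_equiv track=rewrite | github.com/rogue-gamer-ryt/AoC-2024 | Day 2/main.py | check
-- ===== SOURCE A (Python) =====
-- def check(lev):
--     count = 0
--
--     for i in range(len(lev) - 1):
--         a, b = int(lev[i]), int(lev[i + 1])
--         if a > b and abs(a - b) < 4:
--             count += 1
--
--     if count == len(lev) - 1:
--         return True
--
--     count = 0
--     for i in range(len(lev) - 1):
--         a, b = int(lev[i]), int(lev[i + 1])
--         if a < b and abs(a - b) < 4:
--             count += 1
--
--     if count == len(lev) - 1:
--         return True
--
--     return False
-- ===== SOURCE B (Python) =====
-- def check(lev):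
--     # Single short-circuiting pass: a tiny state machine whose direction (sign)
--     # is fixed by the first step; bails out at the first unsafe step.
--     if not lev:
--         return False
--     sign = 0
--     prev = lev[0]
--     for x in lev[1:]:
--         d = x - prev
--         if sign == 0:
--             if not (1 <= abs(d) <= 3):
--                 return False
--             sign = 1 if d > 0 else -1
--         elif not (sign * d >= 1 and abs(d) <= 3):
--             return False
--         prev = x
--     return True
-- ===== Notes on version B (the rewrite author's own statement) =====
-- stated objective: alternative
-- what changed: Replaces A's two full counting scans (count descending-safe pairs then ascending-safe pairs, comparing each count to len-1) by one short-circuiting pass: a state machine that fixes the required direction from the first difference and returns False at the first unsafe step.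
import Mathlib
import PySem

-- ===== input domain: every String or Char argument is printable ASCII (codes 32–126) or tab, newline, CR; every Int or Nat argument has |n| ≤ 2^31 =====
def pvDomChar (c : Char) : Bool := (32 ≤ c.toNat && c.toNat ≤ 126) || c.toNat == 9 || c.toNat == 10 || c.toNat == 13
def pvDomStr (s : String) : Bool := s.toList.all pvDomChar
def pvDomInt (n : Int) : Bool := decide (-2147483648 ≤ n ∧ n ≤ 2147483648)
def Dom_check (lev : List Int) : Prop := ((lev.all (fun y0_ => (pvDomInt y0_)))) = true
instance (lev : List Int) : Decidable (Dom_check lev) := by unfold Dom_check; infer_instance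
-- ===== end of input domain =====

-- B replaces A's two full counting scans by one short-circuiting state-machine pass whose direction is fixed by the first difference (objective: alternative; same return values, including [] → false and a singleton → true).

-- ===== PORT A =====
-- Two counting loops over i in range(len(lev)-1), each count compared against len(lev)-1.
-- Python's locals count/a/b are inlined (a = lev[i], b = lev[i+1]; pyGetD is exact: i and i+1 are in range for i ∈ range(len-1)).
def check (lev : List Int) : Bool :=
  if (PySem.List.pyRange 0 ((lev.length : Int) - 1)).foldl
      (fun count i =>
        if PySem.List.pyGetD lev i 0 > PySem.List.pyGetD lev (i + 1) 0 ∧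
            |PySem.List.pyGetD lev i 0 - PySem.List.pyGetD lev (i + 1) 0| < 4
        then count + 1 else count) (0 : Int) = (lev.length : Int) - 1 then true
  else if (PySem.List.pyRange 0 ((lev.length : Int) - 1)).foldl
      (fun count i =>
        if PySem.List.pyGetD lev i 0 < PySem.List.pyGetD lev (i + 1) 0 ∧
            |PySem.List.pyGetD lev i 0 - PySem.List.pyGetD lev (i + 1) 0| < 4
        then count + 1 else count) (0 : Int) = (lev.length : Int) - 1 then true
  else false

-- ===== PORT B =====
-- The loop body of Source B with its early returns, as structural recursion over the remaining levels.
def safeGo (prev : Int) (sign : Int) (rest : List Int) : Bool :=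
  match rest with
  | [] => true
  | x :: xs =>
    if sign = 0 then
      if ¬ (1 ≤ |x - prev| ∧ |x - prev| ≤ 3) then false
      else safeGo x (if x - prev > 0 then 1 else -1) xs
    else
      if ¬ (sign * (x - prev) ≥ 1 ∧ |x - prev| ≤ 3) then false
      else safeGo x sign xs

def check_alt (lev : List Int) : Bool :=
  match lev with
  | [] => false
  | x :: xs => safeGo x 0 xs

-- ===== PRECONDITION & SPEC =====
def Spec_check (lev : List Int) (out : Bool) : Prop := out = check_alt lev
instance (lev : List Int) (out : Bool) : Decidable (Spec_check lev out) := by unfold Spec_check; infer_instance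

-- ===== CLAIM (what is proved, stated in full; the proofs are below) =====
def Claim_equal_check : Prop := ∀ (lev : List Int), Dom_check lev → Spec_check lev (check lev)

-- ===== LEMMAS AND PROOFS =====

lemma count_loop_eq_iff (xs : List Int) (p : Int → Int → Bool) (hx : xs ≠ []) :
    ((PySem.List.pyRange 0 ((xs.length : Int) - 1)).foldl
      (fun count i =>
        if p (PySem.List.pyGetD xs i 0) (PySem.List.pyGetD xs (i + 1) 0) = true
        then count + 1 else count) (0 : Int) = (xs.length : Int) - 1)
    ↔ ∀ k (h : k + 1 < xs.length), p xs[k] xs[k + 1] := by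
  have hlen : 1 ≤ xs.length := List.length_pos_iff.mpr hx
  have hcast : (xs.length : Int) - 1 = ((xs.length - 1 : Nat) : Int) := by omega
  rw [hcast, PySem.List.pyRange_zero_natCast, List.foldl_map]
  have : ∀ (k : Nat), ((k : Int) + 1) = ((k + 1 : Nat) : Int) := by intro k; push_cast; ring
  simp only [PySem.List.pyGetD_natCast, this]
  rw [PySem.List.foldl_count_if (fun k => p (xs.getD k 0) (xs.getD (k+1) 0)) (List.range (xs.length - 1)) 0]
  rw [zero_add]
  have hc : ((List.countP (fun k => p (xs.getD k 0) (xs.getD (k+1) 0)) (List.range (xs.length - 1)) : Nat) : Int) = ((xs.length - 1 : Nat) : Int)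
      ↔ List.countP (fun k => p (xs.getD k 0) (xs.getD (k+1) 0)) (List.range (xs.length - 1)) = (List.range (xs.length - 1)).length := by
    rw [List.length_range]; omega
  rw [hc, List.countP_eq_length]
  constructor
  · intro h k hk
    have := h k (by simp [List.mem_range]; omega)
    simpa [List.getD_eq_getElem?_getD, List.getElem?_eq_getElem (by omega : k < xs.length),
      List.getElem?_eq_getElem hk] using this
  · intro h k hk
    simp only [List.mem_range] at hk
    have hk1 : k + 1 < xs.length := by omega
    simpa [List.getD_eq_getElem?_getD, List.getElem?_eq_getElem (by omega : k < xs.length),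
      List.getElem?_eq_getElem hk1] using h k hk1

lemma safeGo_pos (rest : List Int) : ∀ prev,
    (safeGo prev 1 rest = true ↔ List.IsChain (fun a b => 1 ≤ b - a ∧ b - a ≤ 3) (prev :: rest)) := by
  induction rest with
  | nil => intro prev; simpa [safeGo] using List.isChain_singleton prev
  | cons x xs ih =>
    intro prev
    rw [List.isChain_cons_cons, ← ih x]
    by_cases hc : 1 ≤ x - prev ∧ x - prev ≤ 3
    · have hcond : ¬ ¬ ((1:Int) * (x - prev) ≥ 1 ∧ |x - prev| ≤ 3) := by
        refine not_not_intro ⟨?_, ?_⟩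
        · rw [one_mul]; exact hc.1
        · rw [abs_le]; omega
      show (if (1:Int) = 0 then _ else _) = true ↔ _
      rw [if_neg one_ne_zero, if_neg hcond]
      simp [hc]
    · have hcond : ¬ ((1:Int) * (x - prev) ≥ 1 ∧ |x - prev| ≤ 3) := by
        rw [one_mul, abs_le]
        rintro ⟨h1, -, h2⟩
        exact hc ⟨h1, h2⟩
      show (if (1:Int) = 0 then _ else _) = true ↔ _
      rw [if_neg one_ne_zero, if_pos hcond]
      simp only [Bool.false_eq_true, false_iff]
      rintro ⟨hab, -⟩
      exact hc hab

lemma safeGo_neg (rest : List Int) : ∀ prev,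
    (safeGo prev (-1) rest = true ↔ List.IsChain (fun a b => 1 ≤ a - b ∧ a - b ≤ 3) (prev :: rest)) := by
  induction rest with
  | nil => intro prev; simpa [safeGo] using List.isChain_singleton prev
  | cons x xs ih =>
    intro prev
    rw [List.isChain_cons_cons, ← ih x]
    have hmul : (-1:Int) * (x - prev) = prev - x := by ring
    by_cases hc : 1 ≤ prev - x ∧ prev - x ≤ 3
    · have hcond : ¬ ¬ ((-1:Int) * (x - prev) ≥ 1 ∧ |x - prev| ≤ 3) := by
        refine not_not_intro ⟨?_, ?_⟩
        · rw [hmul]; exact hc.1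
        · rw [abs_le]; omega
      show (if (-1:Int) = 0 then _ else _) = true ↔ _
      rw [if_neg (by norm_num), if_neg hcond]
      simp [hc]
    · have hcond : ¬ ((-1:Int) * (x - prev) ≥ 1 ∧ |x - prev| ≤ 3) := by
        rw [hmul, abs_le]
        rintro ⟨h1, h2, -⟩
        exact hc ⟨h1, by omega⟩
      show (if (-1:Int) = 0 then _ else _) = true ↔ _
      rw [if_neg (by norm_num), if_pos hcond]
      simp only [Bool.false_eq_true, false_iff]
      rintro ⟨hab, -⟩
      exact hc hab

lemma safeGo_zero (rest : List Int) (prev : Int) :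
    safeGo prev 0 rest = (safeGo prev 1 rest || safeGo prev (-1) rest) := by
  cases rest with
  | nil => simp [safeGo]
  | cons x xs =>
    have e1 : ∀ s : Int, s ≠ 0 →
        safeGo prev s (x :: xs) =
          if ¬ (s * (x - prev) ≥ 1 ∧ |x - prev| ≤ 3) then false else safeGo x s xs := by
      intro s hs
      show (if s = 0 then _ else _) = _
      rw [if_neg hs]
    have e0 : safeGo prev 0 (x :: xs) =
        if ¬ (1 ≤ |x - prev| ∧ |x - prev| ≤ 3) then false
        else safeGo x (if x - prev > 0 then 1 else -1) xs := by
      show (if (0:Int) = 0 then _ else _) = _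
      rw [if_pos rfl]
    rw [e0, e1 1 one_ne_zero, e1 (-1) (by norm_num)]
    by_cases habs : 1 ≤ |x - prev| ∧ |x - prev| ≤ 3
    · by_cases hpos : x - prev > 0
      · have h1 : (1:Int) * (x - prev) ≥ 1 ∧ |x - prev| ≤ 3 := by
          constructor
          · rw [one_mul]; omega
          · exact habs.2
        have h2 : ¬ ((-1:Int) * (x - prev) ≥ 1 ∧ |x - prev| ≤ 3) := by
          rintro ⟨hh, -⟩; nlinarith
        rw [if_neg (not_not_intro habs), if_pos hpos, if_neg (not_not_intro h1), if_pos h2]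
        simp
      · have hd : x - prev < 0 := by
          rcases abs_cases (x - prev) with ⟨he, _⟩ | ⟨he, _⟩ <;> omega
        have h1 : ¬ ((1:Int) * (x - prev) ≥ 1 ∧ |x - prev| ≤ 3) := by
          rintro ⟨hh, -⟩; rw [one_mul] at hh; omega
        have h2 : (-1:Int) * (x - prev) ≥ 1 ∧ |x - prev| ≤ 3 := by
          constructor
          · nlinarith
          · exact habs.2
        rw [if_neg (not_not_intro habs), if_neg hpos, if_pos h1, if_neg (not_not_intro h2)]
        simp
    · have h1 : ¬ ((1:Int) * (x - prev) ≥ 1 ∧ |x - prev| ≤ 3) := by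
        rintro ⟨hh, hh2⟩; rw [one_mul] at hh
        exact habs ⟨by rcases abs_cases (x - prev) with ⟨he, _⟩ | ⟨he, _⟩ <;> omega, hh2⟩
      have h2 : ¬ ((-1:Int) * (x - prev) ≥ 1 ∧ |x - prev| ≤ 3) := by
        rintro ⟨hh, hh2⟩
        have : x - prev ≤ -1 := by nlinarith
        exact habs ⟨by rcases abs_cases (x - prev) with ⟨he, _⟩ | ⟨he, _⟩ <;> omega, hh2⟩
      rw [if_pos habs, if_pos h1, if_pos h2]
      simp

-- ===== VERDICT (by name: the statement is the Claim_ definition above) =====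
theorem check_spec : Claim_equal_check := by
  intro lev _
  unfold Spec_check
  rcases lev with _ | ⟨x, xs⟩
  · decide
  · have hx : x :: xs ≠ [] := by simp
    have h1 := count_loop_eq_iff (x :: xs) (fun a b => decide (a > b ∧ |a - b| < 4)) hx
    have h2 := count_loop_eq_iff (x :: xs) (fun a b => decide (a < b ∧ |a - b| < 4)) hx
    simp only [decide_eq_true_eq] at h1 h2
    have hpos := safeGo_pos xs x
    have hneg := safeGo_neg xs x
    rw [List.isChain_iff_getElem] at hpos hneg
    have hB : check_alt (x :: xs) = (safeGo x 1 xs || safeGo x (-1) xs) := safeGo_zero xs x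
    unfold check
    rw [Bool.eq_iff_iff, hB, Bool.or_eq_true, hpos, hneg]
    constructor
    · intro h
      split_ifs at h with hc1 hc2
      · exact Or.inr (fun k hk => by
          have := h1.mp hc1 k hk
          rw [abs_lt] at this
          constructor <;> omega)
      · exact Or.inl (fun k hk => by
          have := h2.mp hc2 k hk
          rw [abs_lt] at this
          constructor <;> omega)
    · intro hor
      rcases hor with hinc | hdec
      · have hc2 : _ := h2.mpr (fun k hk => by
          have := hinc k hk
          rw [abs_lt]; constructor <;> omega)
        split_ifs with hI1 hI2 <;> first | rfl | exact absurd hc2 hI2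
      · have hc1 : _ := h1.mpr (fun k hk => by
          have := hdec k hk
          rw [abs_lt]; constructor <;> omega)
        split_ifs with hI1 hI2 <;> first | rfl | exact absurd hc1 hI1
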